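-- pv_equiv track=rewrite | github.com/chengdagong/ue-mcp | src/ue_mcp/autoconfig.py | _insert_into_section
-- ===== SOURCE A (Python) =====
-- def _insert_into_section(lines: list[str], section: str, entries: list[str]) -> str:
--     """
--     Insert entries into the specified section.
--     Entries are inserted at the end of the section, before the next section starts.
--
--     Returns:
--         Modified content as a string
--     """
--     section_lower = section.lower()
--     new_lines = []
--     in_target_section = False
--     entries_added = False
--
--     for line in lines:
--         new_lines.append(line)
--
--         if section_lower in line.lower():
--             in_target_section = True
--             continue
--
--         if (
--             in_target_section
--             and line.strip().startswith("[")
--             and section_lower not in line.lower()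
--         ):
--             # Entering a new section - insert entries before it
--             if not entries_added:
--                 for entry in entries:
--                     new_lines.insert(-1, f"{entry}\n")
--                 entries_added = True
--             in_target_section = False
--
--     # If still in target section at end of file, append entries
--     if in_target_section and not entries_added:
--         if new_lines and not new_lines[-1].endswith("\n"):
--             new_lines[-1] += "\n"
--         for entry in entries:
--             new_lines.append(f"{entry}\n")
--
--     return "".join(new_lines)
-- ===== SOURCE B (Python) =====
-- def _insert_into_section(lines: list[str], section: str, entries: list[str]) -> str:
--     """Two index scans + slicing instead of a stateful pass."""
--     sec = section.lower()
--     start = next((i for i, l in enumerate(lines) if sec in l.lower()), None)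
--     if start is None:
--         return "".join(lines)
--     boundary = next(
--         (j for j in range(start + 1, len(lines))
--          if sec not in lines[j].lower() and lines[j].strip().startswith("[")),
--         None,
--     )
--     if boundary is not None:
--         return "".join(lines[:boundary] + [f"{e}\n" for e in entries] + lines[boundary:])
--     out = list(lines)
--     if out and not out[-1].endswith("\n"):
--         out[-1] += "\n"
--     out.extend(f"{e}\n" for e in entries)
--     return "".join(out)
-- ===== Notes on version B (the rewrite author's own statement) =====
-- stated objective: alternative
-- what changed: Replaces A's single stateful pass (in_target/entries_added flags, insert(-1) mutations) with two explicit index scans - first line containing the section, then first boundary line after it - and builds the result by list slicing.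
import Mathlib
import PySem

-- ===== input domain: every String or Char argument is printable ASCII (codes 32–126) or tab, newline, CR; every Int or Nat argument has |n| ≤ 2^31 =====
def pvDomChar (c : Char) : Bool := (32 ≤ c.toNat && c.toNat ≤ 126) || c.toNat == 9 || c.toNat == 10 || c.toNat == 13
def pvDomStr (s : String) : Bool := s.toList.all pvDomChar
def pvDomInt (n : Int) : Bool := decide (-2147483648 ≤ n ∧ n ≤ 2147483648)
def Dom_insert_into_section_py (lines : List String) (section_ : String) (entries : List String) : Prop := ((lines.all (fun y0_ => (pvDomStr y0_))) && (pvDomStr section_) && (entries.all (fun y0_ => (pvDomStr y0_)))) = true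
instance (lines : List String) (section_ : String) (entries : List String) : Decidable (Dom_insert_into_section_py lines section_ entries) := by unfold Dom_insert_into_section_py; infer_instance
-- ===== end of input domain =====

-- B changes the decomposition: two explicit index scans (first section hit, first boundary) and
-- list slicing replace A's single stateful pass; same cost, no claim of speed.
-- ===== PORT A =====
-- A-side helpers: loop body of _insert_into_section; state = (new_lines, in_target_section, entries_added)
def aStep (secLower : String) (entries : List String)
    (st : List String × Bool × Bool) (line : String) : List String × Bool × Bool :=
  let nl := st.1 ++ [line]
  if PySem.Str.isIn secLower (PySem.Str.lower line) then
    (nl, true, st.2.2)   -- in_target_section = True; continue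
  else if st.2.1 && PySem.Str.startswith (PySem.Str.strip line) "["
          && !(PySem.Str.isIn secLower (PySem.Str.lower line)) then
    -- entering a new section: insert entries before this line unless already added
    (if !st.2.2 then entries.foldl (fun acc e => PySem.List.insert acc (-1) (e ++ "\n")) nl
     else nl,
     false, true)
  else (nl, st.2.1, st.2.2)

def insert_into_section_py (lines : List String) (section_ : String) (entries : List String) : String :=
  let secLower := PySem.Str.lower section_
  let st := lines.foldl (aStep secLower entries) ([], false, false)
  -- if still in target section at end of file, append entries
  if st.2.1 && !st.2.2 then
    let nl := if !st.1.isEmpty && !PySem.Str.endswith (st.1.getLastD "") "\n"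
              then st.1.dropLast ++ [st.1.getLastD "" ++ "\n"] else st.1   -- new_lines[-1] += "\n"
    PySem.Str.join "" (nl ++ entries.map (fun e => e ++ "\n"))
  else PySem.Str.join "" st.1

-- ===== PORT B =====
-- B-side helpers
def bContains (secLower : String) (l : String) : Bool :=
  PySem.Str.isIn secLower (PySem.Str.lower l)

def bBoundary (secLower : String) (l : String) : Bool :=
  !bContains secLower l && PySem.Str.startswith (PySem.Str.strip l) "["

-- out[-1] += "\n" fixup of Source B's EOF branch
def bFixLast (lines : List String) : List String :=
  if !lines.isEmpty && !PySem.Str.endswith (lines.getLastD "") "\n"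
  then lines.dropLast ++ [lines.getLastD "" ++ "\n"] else lines

def insert_into_section_py_alt (lines : List String) (section_ : String) (entries : List String) : String :=
  let sec := PySem.Str.lower section_
  match lines.findIdx? (bContains sec) with
  | none => PySem.Str.join "" lines
  | some start =>
    match (lines.drop (start + 1)).findIdx? (bBoundary sec) with
    | some k =>
        let b := start + 1 + k
        PySem.Str.join "" (lines.take b ++ entries.map (fun e => e ++ "\n") ++ lines.drop b)
    | none =>
        PySem.Str.join "" (bFixLast lines ++ entries.map (fun e => e ++ "\n"))

-- ===== PRECONDITION & SPEC =====
def Spec_insert_into_section_py (lines : List String) (section_ : String) (entries : List String) (out : String) : Prop := out = insert_into_section_py_alt lines section_ entries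
instance (lines : List String) (section_ : String) (entries : List String) (out : String) : Decidable (Spec_insert_into_section_py lines section_ entries out) := by unfold Spec_insert_into_section_py; infer_instance

-- ===== CLAIM (what is proved, stated in full; the proofs are below) =====
def Claim_equal_insert_into_section_py : Prop := ∀ (lines : List String) (section_ : String) (entries : List String), Dom_insert_into_section_py lines section_ entries → Spec_insert_into_section_py lines section_ entries (insert_into_section_py lines section_ entries)

-- ===== LEMMAS AND PROOFS =====

-- Python's new_lines.insert(-1, y) on a non-empty list puts y before the last element.
theorem insert_neg_one_append {α : Type} (xs : List α) (x y : α) :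
    PySem.List.insert (xs ++ [x]) (-1) y = xs ++ [y, x] := by
  have hk : PySem.List.sliceIndices (xs ++ [x]).length (some (-1)) none 1
      = ((xs.length : Int), ((xs.length : Int) + 1), 1) := by
    simp [PySem.List.sliceIndices]
  unfold PySem.List.insert
  rw [hk]
  simp

-- the entry-insertion loop of A, acting on new_lines = acc ++ [line]
theorem foldl_insert_neg_one (entries : List String) (acc : List String) (line : String) :
    entries.foldl (fun a e => PySem.List.insert a (-1) (e ++ "\n")) (acc ++ [line])
      = acc ++ entries.map (fun e => e ++ "\n") ++ [line] := by
  induction entries generalizing acc with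
  | nil => simp
  | cons e es ih =>
      simp only [List.foldl_cons, insert_neg_one_append, List.map_cons]
      have := ih (acc ++ [e ++ "\n"])
      simpa using this

-- phase after the entries were inserted: A only appends lines; entries_added stays true
theorem aStep_added (sec : String) (entries : List String) (rest : List String)
    (acc : List String) (b : Bool) :
    ((rest.foldl (aStep sec entries) (acc, b, true)).1 = acc ++ rest) ∧
    ((rest.foldl (aStep sec entries) (acc, b, true)).2.2 = true) := by
  induction rest generalizing acc b with
  | nil => simp
  | cons l rest ih =>
      have hstep : ∃ b', aStep sec entries (acc, b, true) l = (acc ++ [l], b', true) := by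
        unfold aStep
        split_ifs with h1 h2 h3
        · exact ⟨true, rfl⟩
        · exact absurd h3 (by simp)
        · exact ⟨false, rfl⟩
        · exact ⟨b, rfl⟩
      obtain ⟨b', hb'⟩ := hstep
      rw [List.foldl_cons, hb']
      simpa using ih (acc ++ [l]) b'

-- the full result of A from a given fold state
def aRun (sec : String) (entries : List String) (st : List String × Bool × Bool)
    (rest : List String) : String :=
  let st := rest.foldl (aStep sec entries) st
  if st.2.1 && !st.2.2 then
    let nl := if !st.1.isEmpty && !PySem.Str.endswith (st.1.getLastD "") "\n"
              then st.1.dropLast ++ [st.1.getLastD "" ++ "\n"] else st.1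
    PySem.Str.join "" (nl ++ entries.map (fun e => e ++ "\n"))
  else PySem.Str.join "" st.1

-- phase inside the target section, entries not yet added:
-- the result is determined by the first boundary line in the remainder
theorem aRun_in_section (sec : String) (entries : List String) (rest : List String)
    (acc : List String) :
    aRun sec entries (acc, true, false) rest =
      match rest.findIdx? (bBoundary sec) with
      | some k => PySem.Str.join ""
          (acc ++ rest.take k ++ entries.map (fun e => e ++ "\n") ++ rest.drop k)
      | none => PySem.Str.join ""
          (bFixLast (acc ++ rest) ++ entries.map (fun e => e ++ "\n")) := by
  induction rest generalizing acc with
  | nil => simp [aRun, bFixLast]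
  | cons l rest ih =>
      by_cases hb : bBoundary sec l
      · -- boundary: insert entries before l, switch to the added phase
        have h1 : PySem.Str.isIn sec (PySem.Str.lower l) = false := by
          have := (Bool.and_eq_true _ _).mp hb
          simpa [bContains] using this.1
        have h2 : PySem.Str.startswith (PySem.Str.strip l) "[" = true :=
          ((Bool.and_eq_true _ _).mp hb).2
        simp only [PySem.Str.isIn_eq, PySem.Str.toList_lower] at h1
        simp only [PySem.Str.startswith_eq, PySem.Str.toList_strip] at h2
        have h2c : PySem.Chars.startswith (PySem.Chars.strip l.toList) ['['] = true := by
          simpa using h2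
        have hstep : aStep sec entries (acc, true, false) l
            = (acc ++ (entries.map (fun e => e ++ "\n") ++ [l]), false, true) := by
          unfold aStep
          rw [if_neg (by simp [h1]), if_pos (by simp [h1, h2c])]
          simp [foldl_insert_neg_one]
        rw [List.findIdx?_cons, if_pos hb]
        have h3 := aStep_added sec entries rest
          (acc ++ (entries.map (fun e => e ++ "\n") ++ [l])) false
        unfold aRun
        rw [List.foldl_cons, hstep, if_neg (by simp [h3.2]), h3.1]
        simp [List.append_assoc]
      · -- not a boundary: the state stays (·, true, false) whatever bContains says
        have hstep : aStep sec entries (acc, true, false) l = (acc ++ [l], true, false) := by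
          unfold aStep
          by_cases h1 : PySem.Chars.isIn sec.toList (PySem.Chars.lower l.toList) = true
          · simp [h1]
          · have h1' : PySem.Chars.isIn sec.toList (PySem.Chars.lower l.toList) = false := by
              simpa using h1
            have h2 : PySem.Chars.startswith (PySem.Chars.strip l.toList) ['['] = false := by
              simpa [bBoundary, bContains, h1'] using hb
            simp [h1', h2]
        have hrun : aRun sec entries (acc, true, false) (l :: rest)
             = aRun sec entries (acc ++ [l], true, false) rest := by
          unfold aRun
          rw [List.foldl_cons, hstep]
        rw [hrun, ih (acc ++ [l]), List.findIdx?_cons, if_neg (by simp [hb])]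
        cases hfind : rest.findIdx? (bBoundary sec) with
        | none => simp
        | some k => simp [List.append_assoc]

-- phase before the section is found: A scans for the first line containing it
theorem aRun_scan (sec : String) (entries : List String) (rest : List String)
    (acc : List String) :
    aRun sec entries (acc, false, false) rest =
      match rest.findIdx? (bContains sec) with
      | none => PySem.Str.join "" (acc ++ rest)
      | some i => aRun sec entries (acc ++ rest.take (i + 1), true, false) (rest.drop (i + 1)) := by
  induction rest generalizing acc with
  | nil => simp [aRun]
  | cons l rest ih =>
      rw [List.findIdx?_cons]
      by_cases h1 : bContains sec l
      · have h1' : PySem.Chars.isIn sec.toList (PySem.Chars.lower l.toList) = true := by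
          simpa [bContains] using h1
        have hstep : aStep sec entries (acc, false, false) l = (acc ++ [l], true, false) := by
          unfold aStep; simp [h1']
        have hrun : aRun sec entries (acc, false, false) (l :: rest)
             = aRun sec entries (acc ++ [l], true, false) rest := by
          unfold aRun; rw [List.foldl_cons, hstep]
        rw [hrun, if_pos h1]
        simp
      · have h1' : PySem.Chars.isIn sec.toList (PySem.Chars.lower l.toList) = false := by
          simpa [bContains] using h1
        have hstep : aStep sec entries (acc, false, false) l = (acc ++ [l], false, false) := by
          unfold aStep; simp [h1']
        have hrun : aRun sec entries (acc, false, false) (l :: rest)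
             = aRun sec entries (acc ++ [l], false, false) rest := by
          unfold aRun; rw [List.foldl_cons, hstep]
        rw [hrun, ih (acc ++ [l]), if_neg (by simp [h1])]
        cases hfind : rest.findIdx? (bContains sec) with
        | none => simp
        | some i => simp [List.append_assoc]

-- ===== VERDICT (by name: the statement is the Claim_ definition above) =====
theorem insert_into_section_py_spec : Claim_equal_insert_into_section_py := by
  intro lines section_ entries _
  unfold Spec_insert_into_section_py
  show insert_into_section_py lines section_ entries = _
  have hA : insert_into_section_py lines section_ entries
      = aRun (PySem.Str.lower section_) entries ([], false, false) lines := rfl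
  rw [hA, aRun_scan]
  unfold insert_into_section_py_alt
  cases hstart : lines.findIdx? (bContains (PySem.Str.lower section_)) with
  | none => simp [hstart]
  | some i =>
      simp only [hstart, List.nil_append]
      rw [aRun_in_section]
      cases hbd : (lines.drop (i + 1)).findIdx? (bBoundary (PySem.Str.lower section_)) with
      | none => simp [List.take_append_drop]
      | some k =>
          simp only []
          congr 1
          rw [show List.take (i + 1 + k) lines
              = List.take (i + 1) lines ++ List.take k (List.drop (i + 1) lines) from List.take_add,
            List.drop_drop]
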